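-- pv_equiv track=rewrite | github.com/darrenoakey/dazflow2 | src/worker.py | get_upstream_subgraph
-- ===== SOURCE A (Python) =====
-- def get_upstream_subgraph(workflow: dict, target_node_id: str) -> set[str]:
--     """Get all node IDs that are upstream of (or equal to) the target node.
--
--     This includes the target node itself and all its transitive dependencies.
--     """
--     connections = workflow.get("connections", [])
--
--     # Build reverse dependency map: node_id -> list of upstream node_ids
--     upstream_map: dict[str, list[str]] = {}
--     for conn in connections:
--         target_id = conn.get("targetNodeId")
--         source_id = conn.get("sourceNodeId")
--         if target_id and source_id:
--             if target_id not in upstream_map: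
--                 upstream_map[target_id] = []
--             upstream_map[target_id].append(source_id)
--
--     # BFS/DFS to find all upstream nodes
--     result = {target_node_id}
--     to_visit = [target_node_id]
--     while to_visit:
--         node_id = to_visit.pop()
--         for upstream_id in upstream_map.get(node_id, []):
--             if upstream_id not in result:
--                 result.add(upstream_id)
--                 to_visit.append(upstream_id)
--
--     return result
-- ===== SOURCE B (Python) =====
-- def get_upstream_subgraph(workflow: dict, target_node_id: str) -> set[str]:
--     """Get all node IDs that are upstream of (or equal to) the target node.
--
--     On-the-fly DFS: no reverse-adjacency map is precomputed; each popped node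
--     scans the raw connections list for its upstream neighbours.
--     """
--     connections = workflow.get("connections", [])
--
--     result = {target_node_id}
--     stack = [target_node_id]
--     while stack:
--         node = stack.pop()
--         for conn in connections:
--             target_id = conn.get("targetNodeId")
--             source_id = conn.get("sourceNodeId")
--             if target_id and source_id and target_id == node:
--                 if source_id not in result:
--                     result.add(source_id)
--                     stack.append(source_id)
--
--     return result
-- ===== Notes on version B (the rewrite author's own statement) =====
-- stated objective: simpler
-- what changed: Dropped the precomputed reverse-adjacency dict entirely: B does the DFS directly, scanning the raw connections list for each popped node's upstream sources instead of building and querying an upstream_map.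
import Mathlib
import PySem

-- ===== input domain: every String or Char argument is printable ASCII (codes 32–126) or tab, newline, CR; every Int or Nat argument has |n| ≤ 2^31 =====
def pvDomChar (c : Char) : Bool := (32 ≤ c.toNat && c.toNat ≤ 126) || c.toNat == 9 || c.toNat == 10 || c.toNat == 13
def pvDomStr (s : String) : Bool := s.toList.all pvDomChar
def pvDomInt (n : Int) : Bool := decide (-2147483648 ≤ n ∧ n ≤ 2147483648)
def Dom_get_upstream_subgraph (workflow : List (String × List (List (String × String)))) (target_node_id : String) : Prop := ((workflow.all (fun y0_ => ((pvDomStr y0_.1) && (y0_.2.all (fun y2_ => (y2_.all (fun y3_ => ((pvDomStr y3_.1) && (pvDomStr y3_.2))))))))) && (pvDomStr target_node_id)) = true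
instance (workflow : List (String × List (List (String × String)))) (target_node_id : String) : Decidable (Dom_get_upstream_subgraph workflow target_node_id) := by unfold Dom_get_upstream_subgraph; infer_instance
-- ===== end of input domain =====

-- B drops A's precomputed reverse-adjacency map: the DFS scans the raw connections list
-- for each popped node instead (objective: simpler). Return values are identical.

-- ===== PORT A =====
-- the Python `for conn in connections: … if target_id and source_id: upstream_map.setdefault/append`
def pvBuildMapA (connections : List (List (String × String))) : PySem.Dict String (List String) :=
  connections.foldl (fun m conn =>
    let target_id := (PySem.Dict.mk conn).get? "targetNodeId"
    let source_id := (PySem.Dict.mk conn).get? "sourceNodeId"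
    match target_id, source_id with
    | some t, some s =>
        if t ≠ "" ∧ s ≠ "" then
          -- `if target_id not in upstream_map: upstream_map[target_id] = []` then `.append(source_id)`
          m.modify t [] (fun l => l ++ [s])
        else m
    | _, _ => m) PySem.Dict.empty

-- the `while to_visit:` loop; fuel bounds the iteration count (never exhausted: ≤ 1 + #connections pops)
def pvLoopA (um : PySem.Dict String (List String)) :
    Nat → PySem.Set String → List String → PySem.Set String
  | 0, result, _ => result
  | _ + 1, result, [] => result
  | fuel + 1, result, node_id :: to_visit =>
      let st := (um.getD node_id []).foldl
        (fun (st : PySem.Set String × List String) upstream_id =>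
          if st.1.contains upstream_id then st
          else (st.1.add upstream_id, upstream_id :: st.2))
        (result, to_visit)
      pvLoopA um fuel st.1 st.2

def get_upstream_subgraph (workflow : List (String × List (List (String × String)))) (target_node_id : String) : List String :=
  let connections := (PySem.Dict.mk workflow).getD "connections" []
  let upstream_map := pvBuildMapA connections
  pvLoopA upstream_map (connections.length + 2)
    (PySem.Set.add PySem.Set.empty target_node_id) [target_node_id]

-- ===== PORT B =====
-- B's `while stack:` loop: for each popped node, scan connections for its upstream sources
def pvLoopB (connections : List (List (String × String))) :
    Nat → PySem.Set String → List String → PySem.Set String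
  | 0, result, _ => result
  | _ + 1, result, [] => result
  | fuel + 1, result, node :: stack =>
      let st := connections.foldl
        (fun (st : PySem.Set String × List String) conn =>
          let target_id := (PySem.Dict.mk conn).get? "targetNodeId"
          let source_id := (PySem.Dict.mk conn).get? "sourceNodeId"
          match target_id, source_id with
          | some t, some s =>
              if t ≠ "" ∧ s ≠ "" ∧ t = node then
                if st.1.contains s then st else (st.1.add s, s :: st.2)
              else st
          | _, _ => st)
        (result, stack)
      pvLoopB connections fuel st.1 st.2

def get_upstream_subgraph_alt (workflow : List (String × List (List (String × String)))) (target_node_id : String) : List String :=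
  let connections := (PySem.Dict.mk workflow).getD "connections" []
  pvLoopB connections (connections.length + 2)
    (PySem.Set.add PySem.Set.empty target_node_id) [target_node_id]

-- ===== PRECONDITION & SPEC =====
def Spec_get_upstream_subgraph (workflow : List (String × List (List (String × String)))) (target_node_id : String) (out : List String) : Prop := out = get_upstream_subgraph_alt workflow target_node_id
instance (workflow : List (String × List (List (String × String)))) (target_node_id : String) (out : List String) : Decidable (Spec_get_upstream_subgraph workflow target_node_id out) := by unfold Spec_get_upstream_subgraph; infer_instance

-- ===== CLAIM (what is proved, stated in full; the proofs are below) =====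
def Claim_equal_get_upstream_subgraph : Prop := ∀ (workflow : List (String × List (List (String × String)))) (target_node_id : String), Dom_get_upstream_subgraph workflow target_node_id → Spec_get_upstream_subgraph workflow target_node_id (get_upstream_subgraph workflow target_node_id)

-- ===== LEMMAS AND PROOFS =====

-- the upstream sources of `node`, read directly off the connections list
def pvSel (node : String) (conn : List (String × String)) : Option String :=
  match (PySem.Dict.mk conn).get? "targetNodeId", (PySem.Dict.mk conn).get? "sourceNodeId" with
  | some t, some s => if t ≠ "" ∧ s ≠ "" ∧ t = node then some s else none
  | _, _ => none

theorem pvBuildMapA_getD_aux (node : String) :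
    ∀ (conns : List (List (String × String))) (d : PySem.Dict String (List String)),
      (conns.foldl (fun m conn =>
        let target_id := (PySem.Dict.mk conn).get? "targetNodeId"
        let source_id := (PySem.Dict.mk conn).get? "sourceNodeId"
        match target_id, source_id with
        | some t, some s =>
            if t ≠ "" ∧ s ≠ "" then m.modify t [] (fun l => l ++ [s]) else m
        | _, _ => m) d).getD node []
      = d.getD node [] ++ conns.filterMap (pvSel node) := by
  intro conns
  induction conns with
  | nil => intro d; simp
  | cons c cs ih =>
      intro d
      simp only [List.foldl_cons, List.filterMap_cons]
      cases ht : (PySem.Dict.mk c).get? "targetNodeId" with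
      | none =>
        have hsel : pvSel node c = none := by simp [pvSel, ht]
        simp only [hsel]
        rw [ih]
      | some t =>
        cases hs : (PySem.Dict.mk c).get? "sourceNodeId" with
        | none =>
          have hsel : pvSel node c = none := by simp [pvSel, ht, hs]
          simp only [hsel]
          rw [ih]
        | some s =>
          by_cases hts : t ≠ "" ∧ s ≠ ""
          · by_cases heq : t = node
            · have hsel : pvSel node c = some s := by
                simp only [pvSel, ht, hs]
                rw [if_pos ⟨hts.1, hts.2, heq⟩]
              simp only [if_pos hts, hsel]
              rw [ih, PySem.Dict.getD_modify, if_pos heq.symm, ← heq, List.append_assoc]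
              simp
            · have hsel : pvSel node c = none := by
                simp only [pvSel, ht, hs]
                rw [if_neg (by tauto)]
              simp only [if_pos hts, hsel]
              rw [ih, PySem.Dict.getD_modify, if_neg (fun h => heq h.symm)]
          · have hsel : pvSel node c = none := by
              simp only [pvSel, ht, hs]
              rw [if_neg (by tauto)]
            simp only [if_neg hts, hsel]
            rw [ih]

theorem pvBuildMapA_getD (connections : List (List (String × String))) (node : String) :
    (pvBuildMapA connections).getD node [] = connections.filterMap (pvSel node) := by
  have := pvBuildMapA_getD_aux node connections PySem.Dict.empty
  simpa [pvBuildMapA] using this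

theorem pvFoldl_filterMap {α β σ : Type} (f : α → Option β) (g : σ → β → σ) :
    ∀ (l : List α) (s : σ),
      (l.filterMap f).foldl g s =
        l.foldl (fun s a => match f a with | some b => g s b | none => s) s := by
  intro l
  induction l with
  | nil => intro s; rfl
  | cons a l ih =>
      intro s
      simp only [List.filterMap_cons, List.foldl_cons]
      cases h : f a <;> simp [ih]

theorem pvLoop_eq (connections : List (List (String × String))) :
    ∀ (fuel : Nat) (result : PySem.Set String) (tv : List String),
      pvLoopA (pvBuildMapA connections) fuel result tv = pvLoopB connections fuel result tv := by
  intro fuel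
  induction fuel with
  | zero => intro result tv; rfl
  | succ n ih =>
      intro result tv
      cases tv with
      | nil => rfl
      | cons node rest =>
          simp only [pvLoopA, pvLoopB]
          have hinner :
              ((pvBuildMapA connections).getD node []).foldl
                (fun (st : PySem.Set String × List String) upstream_id =>
                  if st.1.contains upstream_id then st
                  else (st.1.add upstream_id, upstream_id :: st.2))
                (result, rest)
              = connections.foldl
                (fun (st : PySem.Set String × List String) conn =>
                  let target_id := (PySem.Dict.mk conn).get? "targetNodeId"
                  let source_id := (PySem.Dict.mk conn).get? "sourceNodeId"
                  match target_id, source_id with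
                  | some t, some s =>
                      if t ≠ "" ∧ s ≠ "" ∧ t = node then
                        if st.1.contains s then st else (st.1.add s, s :: st.2)
                      else st
                  | _, _ => st)
                (result, rest) := by
            rw [pvBuildMapA_getD, pvFoldl_filterMap]
            refine List.foldl_ext _ _ _ (fun st conn _ => ?_)
            cases ht : (PySem.Dict.mk conn).get? "targetNodeId" with
            | none => simp [pvSel, ht]
            | some t =>
              cases hs : (PySem.Dict.mk conn).get? "sourceNodeId" with
              | none => simp [pvSel, ht, hs]
              | some s =>
                by_cases h : t ≠ "" ∧ s ≠ "" ∧ t = node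
                · simp only [pvSel, ht, hs, if_pos h]
                · simp only [pvSel, ht, hs, if_neg h]
          rw [hinner, ih]

-- ===== VERDICT (by name: the statement is the Claim_ definition above) =====
theorem get_upstream_subgraph_spec : Claim_equal_get_upstream_subgraph := by
  intro workflow target_node_id _
  unfold Spec_get_upstream_subgraph get_upstream_subgraph get_upstream_subgraph_alt
  exact pvLoop_eq _ _ _ _
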